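-- pv_equiv track=rewrite | github.com/getadeeb/ProblemCollectionPython | dynamic-programming/contest/count_decreasing_ratings.py | countDecreasingRatings
-- ===== SOURCE A (Python) =====
-- def countDecreasingRatings(ratings):
--     ratings_length = len(ratings)
--     result_count = 0
--     for row in range(ratings_length):
--         current_element = ratings[row]
--         r = 0
--         for col in range(ratings_length):
--             if col >= row:
--                 if current_element - r == ratings[col]:
--                     result_count = result_count + 1
--                 r = r + 1
--     return result_count
-- ===== SOURCE B (Python) =====
-- def countDecreasingRatings(ratings):
--     counts = {}
--     for i, r in enumerate(ratings):
--         k = r + i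
--         counts[k] = counts.get(k, 0) + 1
--     return sum(m * (m + 1) // 2 for m in counts.values())
-- ===== Notes on version B (the rewrite author's own statement) =====
-- stated objective: faster
-- what changed: The O(n^2) double loop counts pairs row<=col with ratings[row]-(col-row)==ratings[col], i.e. equal key ratings[i]+i; B groups indices by that key in one dict pass and sums m*(m+1)/2 per group.
import Mathlib
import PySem

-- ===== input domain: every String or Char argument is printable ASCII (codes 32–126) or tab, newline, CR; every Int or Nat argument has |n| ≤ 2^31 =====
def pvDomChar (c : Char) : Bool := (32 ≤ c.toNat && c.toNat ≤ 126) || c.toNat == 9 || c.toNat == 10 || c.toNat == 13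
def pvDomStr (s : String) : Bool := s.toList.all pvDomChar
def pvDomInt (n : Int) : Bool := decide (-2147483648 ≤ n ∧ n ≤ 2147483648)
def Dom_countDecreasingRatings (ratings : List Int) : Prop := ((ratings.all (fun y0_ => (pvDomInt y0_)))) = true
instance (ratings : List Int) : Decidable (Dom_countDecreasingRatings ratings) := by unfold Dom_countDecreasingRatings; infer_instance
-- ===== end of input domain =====

-- B replaces A's quadratic double loop (which counts pairs row ≤ col with
-- ratings[row] - (col - row) == ratings[col], i.e. equal key ratings[i] + i) by one
-- dict pass grouping indices by that key and summing m*(m+1)//2 per group (objective: faster).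

-- ===== PORT A =====
def countDecreasingRatings (ratings : List Int) : Int :=
  let ratings_length : Int := PySem.List.len ratings
  (PySem.List.pyRange 0 ratings_length).foldl
    (fun result_count row =>
      let current_element := PySem.List.pyGetD ratings row 0
      ((PySem.List.pyRange 0 ratings_length).foldl
        (fun (s : Int × Int) col =>
          if col ≥ row then
            ((if current_element - s.2 = PySem.List.pyGetD ratings col 0 then s.1 + 1 else s.1),
             s.2 + 1)
          else s)
        (result_count, 0)).1)
    0

-- ===== PORT B =====
def countDecreasingRatings_alt (ratings : List Int) : Int :=
  let counts : PySem.Dict Int Int :=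
    (PySem.List.enumerate ratings).foldl
      (fun d p => d.modify (p.2 + p.1) 0 (· + 1)) PySem.Dict.empty
  counts.values.foldl (fun acc m => acc + PySem.Int.floordiv (m * (m + 1)) 2) 0

-- ===== PRECONDITION & SPEC =====
def Spec_countDecreasingRatings (ratings : List Int) (out : Int) : Prop := out = countDecreasingRatings_alt ratings
instance (ratings : List Int) (out : Int) : Decidable (Spec_countDecreasingRatings ratings out) := by unfold Spec_countDecreasingRatings; infer_instance

-- ===== CLAIM (what is proved, stated in full; the proofs are below) =====
def Claim_equal_countDecreasingRatings : Prop := ∀ (ratings : List Int), Dom_countDecreasingRatings ratings → Spec_countDecreasingRatings ratings (countDecreasingRatings ratings)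

-- ===== LEMMAS AND PROOFS =====

-- the key list [ratings[i] + i for i in range(len(ratings))]
def ksOf (ratings : List Int) : List Int :=
  (PySem.List.pyRange 0 (PySem.List.len ratings)).map (fun j => PySem.List.pyGetD ratings j 0 + j)

-- the common mathematical value: number of pairs i ≤ j with l[i] = l[j], by front recursion
def pairCount : List Int → Int
  | [] => 0
  | x :: xs => 1 + (xs.count x : Int) + pairCount xs

def half (m : Int) : Int := PySem.Int.floordiv (m * (m + 1)) 2

lemma half_succ (c : Nat) : half ((c : Int) + 1) = half (c : Int) + ((c : Int) + 1) := by
  unfold half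
  rw [PySem.Int.floordiv_eq_ediv_of_pos (by norm_num), PySem.Int.floordiv_eq_ediv_of_pos (by norm_num)]
  obtain ⟨t, ht⟩ : Even ((c : Int) * ((c : Int) + 1)) := Int.even_mul_succ_self c
  have h2 : ((c : Int) + 1) * (((c : Int) + 1) + 1) = t + t + 2 * ((c : Int) + 1) := by
    linear_combination ht
  omega

lemma len_ksOf (ratings : List Int) : (ksOf ratings).length = ratings.length := by
  simp [ksOf, PySem.List.length_pyRange_one, PySem.List.len_eq]

-- a fold that never changes the state is the identity
lemma foldl_id {α β : Type} (L : List α) (f : β → α → β) (init : β)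
    (h : ∀ s, ∀ x ∈ L, f s x = s) : L.foldl f init = init := by
  induction L generalizing init with
  | nil => rfl
  | cons a L ih =>
      simp only [List.foldl_cons, h init a (by simp)]
      exact ih init (fun s x hx => h s x (by simp [hx]))

-- B side, generic: sum of half(count) over any Nodup list with the same members as l
lemma sum_half_counts (l : List Int) :
    ∀ (K : List Int), K.Nodup → (∀ k, k ∈ K ↔ k ∈ l) →
    ((K.map (fun k => half ((l.count k : Nat) : Int))).sum) = pairCount l := by
  induction l with
  | nil =>
      intro K hnd hmem
      have : K = [] := by
        cases K with
        | nil => rfl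
        | cons a K => exact absurd ((hmem a).1 (by simp)) (by simp)
      simp [this, pairCount]
  | cons x xs ih =>
      intro K hnd hmem
      have hxK : x ∈ K := (hmem x).2 (by simp)
      have hperm : K.Perm (x :: K.erase x) := List.perm_cons_erase hxK
      have hsum : ∀ (f : Int → Int), (K.map f).sum = f x + ((K.erase x).map f).sum := by
        intro f
        simpa using (hperm.map f).sum_eq
      have hne : ∀ k ∈ K.erase x, k ≠ x := by
        intro k hk h
        subst h
        exact hnd.not_mem_erase hk
      have hmapeq : ((K.erase x).map (fun k => half (((x :: xs).count k : Nat) : Int))).sum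
                  = ((K.erase x).map (fun k => half ((xs.count k : Nat) : Int))).sum := by
        congr 1
        apply List.map_congr_left
        intro k hk
        simp [(hne k hk).symm]
      have hfx : half ((((x :: xs).count x : Nat) : Int)) = half ((xs.count x : Nat) : Int) + ((xs.count x : Nat) : Int) + 1 := by
        rw [List.count_cons_self]
        push_cast
        rw [half_succ]
        ring
      rw [hsum, hmapeq, hfx]
      by_cases hx : x ∈ xs
      · have hK : ∀ k, k ∈ K ↔ k ∈ xs := by
          intro k
          rw [hmem k, List.mem_cons]
          constructor
          · rintro (rfl | h)
            · exact hx
            · exact h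
          · exact Or.inr
        have ihK := ih K hnd hK
        rw [hsum (fun k => half ((xs.count k : Nat) : Int))] at ihK
        simp only [pairCount]
        rw [← ihK]
        ring
      · have hK : ∀ k, k ∈ K.erase x ↔ k ∈ xs := by
          intro k
          rw [hnd.mem_erase_iff, hmem k, List.mem_cons]
          constructor
          · rintro ⟨hne', (rfl | h)⟩
            · exact absurd rfl hne'
            · exact h
          · intro h
            exact ⟨fun he => hx (he ▸ h), Or.inr h⟩
        have ihK := ih (K.erase x) (hnd.erase x) hK
        rw [ihK]
        have hcx : xs.count x = 0 := List.count_eq_zero_of_not_mem hx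
        have h0 : half 0 = 0 := by decide
        simp only [pairCount, hcx, Nat.cast_zero, h0]
        ring

-- A side: characterize the inner loop as a countP over the suffix range
lemma inner_count (ratings : List Int) (row cur : Int) :
    ∀ (k : Nat) (m c r : Int), row ≤ m → r = m - row → k = ((PySem.List.len ratings) - m).toNat →
    ((PySem.List.pyRange m (PySem.List.len ratings)).foldl
      (fun (s : Int × Int) col =>
        if col ≥ row then
          ((if cur - s.2 = PySem.List.pyGetD ratings col 0 then s.1 + 1 else s.1), s.2 + 1)
        else s) (c, r)).1
    = c + (((PySem.List.pyRange m (PySem.List.len ratings)).countP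
        (fun col => decide (cur + row = PySem.List.pyGetD ratings col 0 + col)) : Nat) : Int) := by
  intro k
  induction k with
  | zero =>
      intro m c r hm hr hk
      rw [PySem.List.pyRange_one_eq_nil (by omega)]
      simp
  | succ k ih =>
      intro m c r hm hr hk
      by_cases hlt : m < PySem.List.len ratings
      · rw [PySem.List.pyRange_one_cons hlt]
        simp only [List.foldl_cons, List.countP_cons]
        have hcond : (cur - r = PySem.List.pyGetD ratings m 0) ↔ (cur + row = PySem.List.pyGetD ratings m 0 + m) := by
          constructor <;> intro h <;> omega
        rw [if_pos (by omega : m ≥ row)]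
        by_cases hc : cur - r = PySem.List.pyGetD ratings m 0
        · rw [if_pos hc]
          rw [ih (m + 1) (c + 1) (r + 1) (by omega) (by omega) (by omega)]
          simp only [hcond.mp hc, decide_true, if_true]
          omega
        · rw [if_neg hc]
          rw [ih (m + 1) c (r + 1) (by omega) (by omega) (by omega)]
          have hnc : ¬ (cur + row = PySem.List.pyGetD ratings m 0 + m) := fun h => hc (hcond.mpr h)
          simp [hnc]
      · rw [PySem.List.pyRange_one_eq_nil (by omega)]
        simp

-- A side, pure index form equals pairCount
lemma sum_suffix_counts (l : List Int) :
    (((List.range l.length).map (fun j => (((l.drop j).count (l.getD j 0) : Nat) : Int))).sum) = pairCount l := by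
  induction l with
  | nil => simp [pairCount]
  | cons x xs ih =>
      rw [List.length_cons, List.range_succ_eq_map]
      simp only [List.map_cons, List.map_map, List.sum_cons]
      have : ((List.range xs.length).map ((fun j => ((((x :: xs).drop j).count ((x :: xs).getD j 0) : Nat) : Int)) ∘ Nat.succ))
           = (List.range xs.length).map (fun j => (((xs.drop j).count (xs.getD j 0) : Nat) : Int)) := by
        apply List.map_congr_left
        intro j hj
        simp [Function.comp, List.getD]
      rw [this, ih]
      simp [pairCount, List.count_cons_self]
      omega

-- A equals pairCount of the key list
lemma A_eq_pairCount (ratings : List Int) :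
    countDecreasingRatings ratings = pairCount (ksOf ratings) := by
  rw [← sum_suffix_counts (ksOf ratings)]
  unfold countDecreasingRatings
  rw [PySem.List.foldl_congr_mem _ _
    (fun (c row : Int) => c + ((((ksOf ratings).drop row.toNat).count ((ksOf ratings).getD row.toNat 0) : Nat) : Int)) 0 ?_]
  · rw [PySem.List.len_eq, PySem.List.pyRange_zero_nat, List.foldl_map, PySem.List.foldl_add, zero_add, ← len_ksOf]
    apply congrArg
    apply List.map_congr_left
    intro j hj
    simp
  · intro c row hrow
    obtain ⟨h0, hlt⟩ := PySem.List.mem_pyRange_one.mp hrow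
    show ((PySem.List.pyRange 0 (PySem.List.len ratings)).foldl _ (c, 0)).1 = _
    rw [PySem.List.pyRange_one_append 0 row (PySem.List.len ratings) h0 (le_of_lt hlt), List.foldl_append]
    rw [foldl_id (PySem.List.pyRange 0 row) _ (c, (0:Int)) ?_]
    · rw [inner_count ratings row (PySem.List.pyGetD ratings row 0)
        ((PySem.List.len ratings - row).toNat) row c 0 (le_refl row) (by omega) rfl]
      apply congrArg
      have hget : ∀ col : Int, 0 ≤ col → col < PySem.List.len ratings →
          PySem.List.pyGetD (ksOf ratings) col 0 = PySem.List.pyGetD ratings col 0 + col := by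
        intro col hc0 hcl
        exact PySem.List.pyGetD_map_pyRange_of_nonneg _ _ _ _ hc0 hcl
      have hlen2 : PySem.List.len (ksOf ratings) = PySem.List.len ratings := by
        simp [PySem.List.len_eq, len_ksOf]
      have step1 : (PySem.List.pyRange row (PySem.List.len ratings)).countP
            (fun col => decide (PySem.List.pyGetD ratings row 0 + row = PySem.List.pyGetD ratings col 0 + col))
          = (PySem.List.pyRange row (PySem.List.len ratings)).countP
            (fun col => decide (PySem.List.pyGetD (ksOf ratings) row 0 = PySem.List.pyGetD (ksOf ratings) col 0)) := by
        apply List.countP_congr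
        intro col hcol
        obtain ⟨hc1, hc2⟩ := PySem.List.mem_pyRange_one.mp hcol
        rw [hget col (le_trans h0 hc1) hc2, hget row h0 hlt]
      rw [step1]
      have step2 : (PySem.List.pyRange row (PySem.List.len ratings)).countP
            (fun col => decide (PySem.List.pyGetD (ksOf ratings) row 0 = PySem.List.pyGetD (ksOf ratings) col 0))
          = ((ksOf ratings).drop row.toNat).countP
            (fun y => decide (PySem.List.pyGetD (ksOf ratings) row 0 = y)) := by
        rw [← hlen2, ← PySem.List.map_pyGetD_pyRange (ksOf ratings) 0 h0, List.countP_map]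
        rfl
      rw [step2]
      have hb : row < ((ksOf ratings).length : Int) := by
        rw [len_ksOf]
        simpa [PySem.List.len_eq] using hlt
      have hbn : row.toNat < (ksOf ratings).length := by omega
      have hrowget : PySem.List.pyGetD (ksOf ratings) row 0 = (ksOf ratings).getD row.toNat 0 := by
        rw [PySem.List.pyGetD_eq_getElem _ _ h0 hb, List.getD_eq_getElem?_getD,
            List.getElem?_eq_getElem hbn, Option.getD_some]
      rw [hrowget, List.count]
      apply congrArg
      apply List.countP_congr
      intro y hy
      simp only [decide_eq_true_eq, beq_iff_eq]
      exact eq_comm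
    · intro s x hx
      obtain ⟨_, hxr⟩ := PySem.List.mem_pyRange_one.mp hx
      rw [if_neg (by omega)]

-- B equals pairCount of the key list
lemma B_eq_pairCount (ratings : List Int) :
    countDecreasingRatings_alt ratings = pairCount (ksOf ratings) := by
  unfold countDecreasingRatings_alt
  simp only []
  have hcounts : (PySem.List.enumerate ratings).foldl
      (fun d p => d.modify (p.2 + p.1) (0:Int) (· + 1)) PySem.Dict.empty = PySem.Dict.counter (ksOf ratings) := by
    rw [PySem.Dict.counter_eq_foldl, ksOf, PySem.List.enumerate_eq_map_pyRange ratings 0,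
        List.foldl_map, List.foldl_map]
  rw [hcounts, PySem.Dict.values_eq_map_keys _ (PySem.Dict.nodup_keys_counter _) 0,
      PySem.List.foldl_add, List.map_map, zero_add]
  have hfun : (((PySem.Dict.counter (ksOf ratings)).keys).map
        ((fun m => PySem.Int.floordiv (m * (m + 1)) 2) ∘ (fun k => (PySem.Dict.counter (ksOf ratings)).getD k 0)))
      = ((PySem.Dict.counter (ksOf ratings)).keys).map (fun k => half (((ksOf ratings).count k : Nat) : Int)) := by
    apply List.map_congr_left
    intro k hk
    simp [Function.comp, PySem.Dict.getD_counter, half]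
  rw [hfun]
  exact sum_half_counts (ksOf ratings) _ (PySem.Dict.nodup_keys_counter _)
    (fun k => by rw [PySem.Dict.keys_counter, PySem.Set.mem_ofList])

theorem countDecreasingRatings_spec : Claim_equal_countDecreasingRatings := by
  intro ratings _
  unfold Spec_countDecreasingRatings
  rw [A_eq_pairCount, B_eq_pairCount]
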